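-- pv_equiv track=rewrite | github.com/jameshyojaelee/AbProp | src/abprop/utils/liabilities.py | _estimate_free_cysteines
-- ===== SOURCE A (Python) =====
-- _CANONICAL_DISULFIDE_SPAN = (2, 20)
--
-- def _estimate_free_cysteines(sequence: str) -> int:
--     """Estimate number of cysteines that do not participate in canonical disulfide pairs."""
--     indices = [idx for idx, residue in enumerate(sequence) if residue == "C"]
--     if not indices:
--         return 0
--
--     min_span, max_span = _CANONICAL_DISULFIDE_SPAN
--     used = set()
--     for i, start in enumerate(indices):
--         if start in used:
--             continue
--         for end in indices[i + 1 :]: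
--             if end in used:
--                 continue
--             span = end - start
--             if span < min_span:
--                 continue
--             if span > max_span:
--                 break
--             used.add(start)
--             used.add(end)
--             break
--
--     paired = len(used)
--     free = len(indices) - paired
--     return free
-- ===== SOURCE B (Python) =====
-- def _estimate_free_cysteines(sequence: str) -> int:
--     """Estimate free cysteines by sweeping a pending list of unpaired positions."""
--     pending = [idx for idx, residue in enumerate(sequence) if residue == "C"]
--     free = 0
--     while pending:
--         start = pending.pop(0)
--         partner = None
--         for end in pending:
--             if end - start >= 2:
--                 if end - start <= 20:
--                     partner = end
--                 break
--         if partner is None: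
--             free += 1
--         else:
--             pending.remove(partner)
--     return free
-- ===== Notes on version B (the rewrite author's own statement) =====
-- stated objective: simpler
-- what changed: Replaces A's used-set greedy (outer enumerate loop that skips used starts plus an inner continue/break scan over indices[i+1:]) by a single sweep over a shrinking pending list: pop the first unpaired cysteine, find its first partner at distance in [2,20] among the pending ones, delete it, and count a free cysteine when no partner exists; the used set and all skip logic disappear.
import Mathlib
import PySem

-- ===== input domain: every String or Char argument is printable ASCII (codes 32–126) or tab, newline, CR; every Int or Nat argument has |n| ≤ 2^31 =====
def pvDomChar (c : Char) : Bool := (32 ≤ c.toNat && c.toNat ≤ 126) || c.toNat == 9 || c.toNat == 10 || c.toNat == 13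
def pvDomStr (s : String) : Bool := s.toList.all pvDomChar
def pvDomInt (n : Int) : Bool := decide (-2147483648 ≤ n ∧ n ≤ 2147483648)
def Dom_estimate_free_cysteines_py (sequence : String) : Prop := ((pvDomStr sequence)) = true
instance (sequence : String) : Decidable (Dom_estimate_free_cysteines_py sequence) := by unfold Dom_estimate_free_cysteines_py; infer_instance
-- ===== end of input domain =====

-- B replaces A's used-set greedy (outer scan skipping used starts, inner scan with
-- continue/break over later indices) by a single sweep over a pending list: pop the first
-- unpaired position, find its first partner at distance in [2,20], delete it; same output,
-- simpler state (no used set, no skip logic).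

-- ===== PORT A =====
-- the comprehension `[idx for idx, residue in enumerate(sequence) if residue == "C"]`
-- (identical in Source A and Source B)
def pvIndices (sequence : String) : List Int :=
  ((PySem.List.enumerate sequence.toList).filter (fun p => p.2 == 'C')).map (·.1)

-- A's inner `for end in indices[i+1:]` loop with its continue/break structure
def pvAInner (start : Int) (used : PySem.Set Int) : List Int → PySem.Set Int
  | [] => used
  | e :: tl =>
    if used.contains e then pvAInner start used tl
    else if e - start < 2 then pvAInner start used tl
    else if e - start > 20 then used
    else (used.add start).add e

-- A's outer `for i, start in enumerate(indices)` loop (the tail of the list is indices[i+1:])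
def pvALoop : List Int → PySem.Set Int → PySem.Set Int
  | [], used => used
  | s :: tl, used => if used.contains s then pvALoop tl used else pvALoop tl (pvAInner s used tl)

def estimate_free_cysteines_py (sequence : String) : Int :=
  let indices := pvIndices sequence
  if indices = [] then 0
  else (indices.length : Int) - PySem.Set.len (pvALoop indices PySem.Set.empty)

-- ===== PORT B =====
-- B's partner search: first pending position at distance ≥ 2; pair iff also ≤ 20
def pvFindEnd (start : Int) : List Int → Option Int
  | [] => none
  | e :: tl =>
    if e - start ≥ 2 then (if e - start ≤ 20 then some e else none)
    else pvFindEnd start tl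

-- B's `while pending:` sweep with the `free` counter
def pvBLoop : List Int → Int → Int
  | [], free => free
  | s :: rest, free =>
    match pvFindEnd s rest with
    | none => pvBLoop rest (free + 1)
    | some e => pvBLoop (rest.erase e) free
termination_by l _ => l.length
decreasing_by
  · simp
  · exact Nat.lt_succ_of_le List.length_erase_le

def estimate_free_cysteines_py_alt (sequence : String) : Int :=
  pvBLoop (pvIndices sequence) 0

-- ===== PRECONDITION & SPEC =====
def Spec_estimate_free_cysteines_py (sequence : String) (out : Int) : Prop := out = estimate_free_cysteines_py_alt sequence
instance (sequence : String) (out : Int) : Decidable (Spec_estimate_free_cysteines_py sequence out) := by unfold Spec_estimate_free_cysteines_py; infer_instance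

-- ===== CLAIM (what is proved, stated in full; the proofs are below) =====
def Claim_equal_estimate_free_cysteines_py : Prop := ∀ (sequence : String), Dom_estimate_free_cysteines_py sequence → Spec_estimate_free_cysteines_py sequence (estimate_free_cysteines_py sequence)

-- ===== LEMMAS AND PROOFS =====

-- A's inner scan over the raw tail (skipping used entries) is B's partner search on the
-- tail with the used entries filtered out.
theorem pvAInner_eq_findEnd (s : Int) (U : PySem.Set Int) (tl : List Int) :
    pvAInner s U tl =
      match pvFindEnd s (tl.filter (fun x => !U.contains x)) with
      | some e => (U.add s).add e
      | none => U := by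
  induction tl with
  | nil => simp [pvAInner, pvFindEnd]
  | cons e tl ih =>
    by_cases he : e ∈ (U : List Int)
    · simp [pvAInner, PySem.Set.contains, he, ih]
    · by_cases h2 : e - s < 2
      · have h2' : ¬ (e - s ≥ 2) := by omega
        simp [pvAInner, pvFindEnd, PySem.Set.contains, he, h2, h2', ih]
      · by_cases h20 : e - s > 20
        · have h2' : e - s ≥ 2 := by omega
          have h20' : ¬ (e - s ≤ 20) := by omega
          simp [pvAInner, pvFindEnd, PySem.Set.contains, he, h2, h2', h20, h20']
        · have h2' : e - s ≥ 2 := by omega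
          have h20' : e - s ≤ 20 := by omega
          simp [pvAInner, pvFindEnd, PySem.Set.contains, he, h2, h2', h20, h20']

theorem pvFindEnd_mem {s e : Int} : ∀ {l : List Int}, pvFindEnd s l = some e → e ∈ l := by
  intro l
  induction l with
  | nil => simp [pvFindEnd]
  | cons x tl ih =>
    intro h
    simp only [pvFindEnd] at h
    split at h
    · split at h
      · simp at h; simp [h]
      · simp at h
    · exact List.mem_cons_of_mem _ (ih h)

-- Loop correspondence: running A's outer loop from an arbitrary used set U matches B's
-- sweep over the not-yet-used entries; the free counter plus the used-set size accounts
-- for every index.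
theorem pv_key : ∀ (l : List Int), l.Nodup → ∀ (U : PySem.Set Int) (c : Int),
    pvBLoop (l.filter (fun x => !U.contains x)) c + ((pvALoop l U).length : Int)
      = c + ((l.filter (fun x => !U.contains x)).length : Int) + (U.length : Int) := by
  intro l
  induction l with
  | nil => intro _ U c; simp [pvBLoop, pvALoop]
  | cons s tl ih =>
    intro hnd U c
    have hstl : s ∉ tl := (List.nodup_cons.mp hnd).1
    have hndtl : tl.Nodup := (List.nodup_cons.mp hnd).2
    by_cases hs : U.contains s = true
    · have hsb : (!U.contains s) = false := by rw [hs]; rfl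
      rw [List.filter_cons, hsb, if_neg Bool.false_ne_true]
      simp only [pvALoop, hs, if_true]
      exact ih hndtl U c
    · have hsb : (!U.contains s) = true := by simp at hs ⊢; exact hs
      rw [List.filter_cons, hsb, if_pos rfl]
      set f := tl.filter (fun x => !U.contains x) with hf
      have hALoop : pvALoop (s :: tl) U = pvALoop tl (pvAInner s U tl) := by
        simp only [pvALoop]; rw [if_neg hs]
      rw [hALoop, pvAInner_eq_findEnd, ← hf]
      cases hfe : pvFindEnd s f with
      | none =>
        simp only
        have hB : pvBLoop (s :: f) c = pvBLoop f (c + 1) := by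
          simp [pvBLoop, hfe]
        rw [hB]
        have hih := ih hndtl U (c + 1)
        rw [← hf] at hih
        rw [hih, List.length_cons]
        push_cast
        omega
      | some e =>
        simp only
        have hB : pvBLoop (s :: f) c = pvBLoop (f.erase e) c := by
          simp [pvBLoop, hfe]
        rw [hB]
        have hef : e ∈ f := pvFindEnd_mem hfe
        have hetl : e ∈ tl := (List.mem_filter.mp hef).1
        have heU : ¬ U.contains e = true := by
          have := (List.mem_filter.mp hef).2; simp at this; simpa using this
        have hse : s ≠ e := fun h => hstl (h ▸ hetl)
        -- the updated used set is U ++ [s, e]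
        have h1 : U.add s = U ++ [s] := by
          unfold PySem.Set.add; rw [if_neg hs]
        have h2 : ¬ ((U ++ [s]).contains e = true) := by
          intro h
          rcases List.mem_append.mp (List.contains_iff_mem.mp h) with h' | h'
          · exact heU (List.contains_iff_mem.mpr h')
          · simp at h'; exact hse h'.symm
        have hU' : (U.add s).add e = U ++ [s, e] := by
          rw [h1]; unfold PySem.Set.add; rw [if_neg h2]; simp
        -- filtering by the updated set removes exactly e from f
        have hfilter : tl.filter (fun x => !((U.add s).add e).contains x) = f.erase e := by
          have hnf : f.Nodup := hndtl.filter _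
          rw [hnf.erase_eq_filter e, hf, List.filter_filter]
          apply List.filter_congr
          intro x hx
          have hxs : x ≠ s := fun h => hstl (h ▸ hx)
          rw [hU', Bool.eq_iff_iff]
          simp [PySem.Set.contains, hxs]
          tauto
        have hlenU' : ((U.add s).add e).length = U.length + 2 := by
          rw [hU']; simp
        have hih := ih hndtl ((U.add s).add e) c
        rw [hfilter] at hih
        rw [hih, hlenU']
        have hle : (f.erase e).length = f.length - 1 := List.length_erase_of_mem hef
        have hpos : 0 < f.length := List.length_pos_of_mem hef
        rw [hle, List.length_cons]
        push_cast [Nat.cast_sub (by omega : 1 ≤ f.length)]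
        omega

-- indices of a string are strictly increasing, hence nodup
theorem pvIndices_nodup (sequence : String) : (pvIndices sequence).Nodup := by
  have h := PySem.List.pairwise_lt_enumerate sequence.toList 0
  have h2 := h.filter (fun p => p.2 == 'C')
  have h3 : ((PySem.List.enumerate sequence.toList 0).filter (fun p => p.2 == 'C')).map
      (·.1) |>.Pairwise (· < ·) := List.Pairwise.map _ (fun _ _ h => h) h2
  exact h3.imp (fun h => ne_of_lt h)

-- ===== VERDICT (by name: the statement is the Claim_ definition above) =====
theorem estimate_free_cysteines_py_spec : Claim_equal_estimate_free_cysteines_py := by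
  intro seq _
  unfold Spec_estimate_free_cysteines_py estimate_free_cysteines_py estimate_free_cysteines_py_alt
  set l := pvIndices seq with hl
  have hfl : l.filter (fun x => !(PySem.Set.empty : PySem.Set Int).contains x) = l := by
    simp [PySem.Set.empty, PySem.Set.contains]
  have hkey := pv_key l (pvIndices_nodup seq) PySem.Set.empty 0
  rw [hfl] at hkey
  by_cases hnil : l = []
  · simp [hnil, pvBLoop]
  · simp only [hnil, if_false, PySem.Set.len]
    have : ((PySem.Set.empty : PySem.Set Int).length : Int) = 0 := by simp [PySem.Set.empty]
    omega
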